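-- pv_equiv track=rewrite | github.com/Ab2nour/competitive-programming | src/todo/Chaîne de production.py | tempsMinSansDelai
-- ===== SOURCE A (Python) =====
-- from queue import PriorityQueue
--
-- def tempsMinSansDelai(nbPieces, machines):
--     enAttente = PriorityQueue()
--
--     for temps in machines:
--         enAttente.put((temps, temps))
--
--     temps = []
--
--     for _ in range(nbPieces):
--         tempsMin, tempsTraitement = enAttente.get()
--         temps.append(tempsMin)
--         enAttente.put((tempsMin + tempsTraitement, tempsTraitement))
--
--     return temps
-- ===== SOURCE B (Python) =====
-- def tempsMinSansDelai(nbPieces, machines):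
--     # Per-machine completion counters with a linear argmin scan per piece (no priority queue).
--     counts = [0] * len(machines)
--     temps = []
--     for _ in range(nbPieces):
--         best = None
--         for i, (t, c) in enumerate(zip(machines, counts)):
--             key = ((c + 1) * t, t)
--             if best is None or key < best[0]:
--                 best = (key, i)
--         (v, _), i = best
--         temps.append(v)
--         counts[i] += 1
--     return temps
-- ===== Notes on version B (the rewrite author's own statement) =====
-- stated objective: alternative
-- what changed: Replaces the priority queue of pending completion times by a fixed array of per-machine completion counters, recomputing each machine's next completion time and selecting the minimum with a linear scan every round instead of heap put/get.
import Mathlib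
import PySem

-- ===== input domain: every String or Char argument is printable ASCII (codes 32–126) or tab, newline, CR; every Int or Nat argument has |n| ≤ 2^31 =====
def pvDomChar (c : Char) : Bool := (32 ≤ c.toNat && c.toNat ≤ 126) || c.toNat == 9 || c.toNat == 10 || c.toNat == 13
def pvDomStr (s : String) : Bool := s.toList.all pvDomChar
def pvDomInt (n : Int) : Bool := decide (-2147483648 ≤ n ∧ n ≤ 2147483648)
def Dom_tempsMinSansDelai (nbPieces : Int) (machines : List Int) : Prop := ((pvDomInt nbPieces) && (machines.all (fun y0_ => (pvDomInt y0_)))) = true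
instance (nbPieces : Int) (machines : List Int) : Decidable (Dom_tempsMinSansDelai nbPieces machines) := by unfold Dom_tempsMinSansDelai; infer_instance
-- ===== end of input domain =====

-- B replaces A's priority queue by per-machine completion counters with a linear
-- argmin scan each round (objective: alternative structure, same return value).

-- ===== PORT A =====
-- A's PriorityQueue of (time, processing-time) pairs is modelled as a list kept
-- sorted by Python's tuple order: put = ordered insert, get = take the head.
def pqInsert (x : Int × Int) : List (Int × Int) → List (Int × Int)
  | [] => [x]
  | y :: ys =>
      if x.1 < y.1 ∨ (x.1 = y.1 ∧ x.2 ≤ y.2) then x :: y :: ys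
      else y :: pqInsert x ys

def loopA : Nat → List (Int × Int) → List Int → List Int
  | 0, _, temps => temps
  | Nat.succ _, [], temps => temps  -- Python blocks forever here (empty queue); the port returns the list built so far
  | Nat.succ n, (tempsMin, tempsTraitement) :: rest, temps =>
      loopA n (pqInsert (tempsMin + tempsTraitement, tempsTraitement) rest) (temps ++ [tempsMin])

def tempsMinSansDelai (nbPieces : Int) (machines : List Int) : List Int :=
  loopA nbPieces.toNat (machines.foldl (fun h t => pqInsert (t, t) h) []) []

-- ===== PORT B =====
-- inner `for i, (t, c) in enumerate(zip(machines, counts))` scan for the best (key, i)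
def scanStep (best : Option ((Int × Int) × Nat)) (q : (Int × Int) × Nat) : Option ((Int × Int) × Nat) :=
  match best with
  | none => some (((q.1.2 + 1) * q.1.1, q.1.1), q.2)
  | some b =>
      if (q.1.2 + 1) * q.1.1 < b.1.1 ∨ ((q.1.2 + 1) * q.1.1 = b.1.1 ∧ q.1.1 < b.1.2) then
        some (((q.1.2 + 1) * q.1.1, q.1.1), q.2)
      else best

def scanB (machines counts : List Int) : Option ((Int × Int) × Nat) :=
  ((machines.zip counts).zipIdx).foldl scanStep none

def loopB : Nat → List Int → List Int → List Int → List Int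
  | 0, _, _, temps => temps
  | Nat.succ n, machines, counts, temps =>
      match scanB machines counts with
      | none => temps  -- Python raises here (best is None, empty machines); the port returns the list built so far
      | some ((v, _), i) =>
          loopB n machines (counts.set i (counts.getD i 0 + 1)) (temps ++ [v])

def tempsMinSansDelai_alt (nbPieces : Int) (machines : List Int) : List Int :=
  loopB nbPieces.toNat machines (machines.map (fun _ => (0 : Int))) []

-- ===== PRECONDITION & SPEC =====
def Spec_tempsMinSansDelai (nbPieces : Int) (machines : List Int) (out : List Int) : Prop := out = tempsMinSansDelai_alt nbPieces machines
instance (nbPieces : Int) (machines : List Int) (out : List Int) : Decidable (Spec_tempsMinSansDelai nbPieces machines out) := by unfold Spec_tempsMinSansDelai; infer_instance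

-- ===== CLAIM (what is proved, stated in full; the proofs are below) =====
def Claim_equal_tempsMinSansDelai : Prop := ∀ (nbPieces : Int) (machines : List Int), Dom_tempsMinSansDelai nbPieces machines → Spec_tempsMinSansDelai nbPieces machines (tempsMinSansDelai nbPieces machines)

-- ===== LEMMAS AND PROOFS =====

-- Python's tuple ≤ on (Int × Int)
def pqLe (x y : Int × Int) : Prop := x.1 < y.1 ∨ (x.1 = y.1 ∧ x.2 ≤ y.2)

-- the key B computes for a (machine, count) pair
def keyF (p : Int × Int) : Int × Int := ((p.2 + 1) * p.1, p.1)

def keysOf (machines counts : List Int) : List (Int × Int) :=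
  (machines.zip counts).map keyF

lemma pqLe_total (x y : Int × Int) : pqLe x y ∨ pqLe y x := by
  unfold pqLe; omega

lemma pqLe_trans {x y z : Int × Int} (h1 : pqLe x y) (h2 : pqLe y z) : pqLe x z := by
  unfold pqLe at *; omega

lemma pqLe_refl (x : Int × Int) : pqLe x x := Or.inr ⟨rfl, le_refl _⟩

lemma pqLe_antisymm {x y : Int × Int} (h1 : pqLe x y) (h2 : pqLe y x) : x = y := by
  obtain ⟨a, b⟩ := x; obtain ⟨c, d⟩ := y
  unfold pqLe at *
  simp only [Prod.mk.injEq]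
  omega

lemma pqInsert_perm (x : Int × Int) (l : List (Int × Int)) :
    (pqInsert x l).Perm (x :: l) := by
  induction l with
  | nil => simp [pqInsert]
  | cons y ys ih =>
      simp only [pqInsert]
      split
      · exact List.Perm.refl _
      · exact (List.Perm.cons y ih).trans (List.Perm.swap x y ys)

lemma pqInsert_sorted {x : Int × Int} {l : List (Int × Int)}
    (h : l.Pairwise pqLe) : (pqInsert x l).Pairwise pqLe := by
  induction l with
  | nil => simp [pqInsert, List.pairwise_cons]
  | cons y ys ih =>
      rw [List.pairwise_cons] at h
      simp only [pqInsert]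
      split
      · rename_i hxy
        have hx : pqLe x y := hxy
        refine List.pairwise_cons.2 ⟨?_, List.pairwise_cons.2 ⟨h.1, h.2⟩⟩
        intro z hz
        rcases List.mem_cons.mp hz with hz | hz
        · exact hz ▸ hx
        · exact pqLe_trans hx (h.1 z hz)
      · rename_i hxy
        have hyx : pqLe y x := by
          rcases pqLe_total x y with h' | h'
          · exact absurd h' hxy
          · exact h'
        refine List.pairwise_cons.2 ⟨?_, ih h.2⟩
        intro z hz
        rcases List.mem_cons.mp ((pqInsert_perm x ys).mem_iff.mp hz) with hz' | hz'
        · exact hz' ▸ hyx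
        · exact h.1 z hz'

lemma foldl_pqInsert_perm (l : List Int) (h : List (Int × Int)) :
    (l.foldl (fun h t => pqInsert (t, t) h) h).Perm ((l.map fun t => (t, t)) ++ h) := by
  induction l generalizing h with
  | nil => simp
  | cons a l ih =>
      simp only [List.foldl_cons, List.map_cons]
      refine (ih _).trans ?_
      refine (List.Perm.append_left _ (pqInsert_perm (a, a) h)).trans ?_
      exact List.perm_middle

lemma foldl_pqInsert_sorted (l : List Int) (h : List (Int × Int))
    (hs : h.Pairwise pqLe) :
    (l.foldl (fun h t => pqInsert (t, t) h) h).Pairwise pqLe := by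
  induction l generalizing h with
  | nil => exact hs
  | cons a l ih => exact ih _ (pqInsert_sorted hs)

lemma keysOf_zero (machines : List Int) :
    keysOf machines (machines.map fun _ => (0 : Int)) = machines.map fun t => (t, t) := by
  induction machines with
  | nil => rfl
  | cons a l ih =>
      simp only [keysOf, List.map_cons, List.zip_cons_cons, keyF] at *
      simp only [ih]
      norm_num

-- spec of the argmin scan
lemma scanGo_spec :
    ∀ (pairs : List ((Int × Int) × Nat)) (best : Option ((Int × Int) × Nat)),
      pairs ≠ [] ∨ best.isSome →
      ∃ K i, pairs.foldl scanStep best = some (K, i) ∧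
        ((∃ q ∈ pairs, i = q.2 ∧ K = keyF q.1) ∨ best = some (K, i)) ∧
        (∀ q ∈ pairs, pqLe K (keyF q.1)) ∧
        (∀ b, best = some b → pqLe K b.1) := by
  intro pairs
  induction pairs with
  | nil =>
      intro best h
      rcases h with h | h
      · exact absurd rfl h
      · match best, h with
        | some (K, i), _ =>
            exact ⟨K, i, rfl, Or.inr rfl, by simp, by rintro b hb; injection hb with hb; exact hb ▸ pqLe_refl _⟩
  | cons q rest ih =>
      intro best _
      have hstep : ∃ b', scanStep best q = some b' ∧ pqLe b'.1 (keyF q.1) ∧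
          (∀ b, best = some b → pqLe b'.1 b.1) ∧
          (b' = (keyF q.1, q.2) ∨ best = some b') := by
        match best with
        | none =>
            exact ⟨(keyF q.1, q.2), rfl, pqLe_refl _, by simp, Or.inl rfl⟩
        | some b =>
            simp only [scanStep]
            split
            · rename_i hlt
              refine ⟨(keyF q.1, q.2), rfl, pqLe_refl _, ?_, Or.inl rfl⟩
              rintro b0 h0
              injection h0 with h0
              subst h0
              simp only [keyF, pqLe]
              rcases hlt with hlt | hlt
              · exact Or.inl hlt
              · exact Or.inr ⟨hlt.1, le_of_lt hlt.2⟩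
            · rename_i hlt
              refine ⟨b, rfl, ?_, ?_, Or.inr rfl⟩
              · simp only [keyF, pqLe]
                omega
              · rintro b0 h0; injection h0 with h0; subst h0; exact pqLe_refl _
      obtain ⟨b', hb', hle_q, hle_best, hfrom⟩ := hstep
      obtain ⟨K, i, hres, hmem, hmin, hminb⟩ := ih (scanStep best q) (Or.inr (by rw [hb']; rfl))
      refine ⟨K, i, by simpa [List.foldl_cons] using hres, ?_, ?_, ?_⟩
      · rcases hmem with ⟨q', hq', hi, hK⟩ | hbest
        · exact Or.inl ⟨q', List.mem_cons_of_mem _ hq', hi, hK⟩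
        · rw [hb'] at hbest; injection hbest with hbest
          rcases hfrom with h' | h'
          · have hKi : (K, i) = (keyF q.1, q.2) := hbest.symm.trans h'
            exact Or.inl ⟨q, List.mem_cons_self,
              (Prod.ext_iff.mp hKi).2, (Prod.ext_iff.mp hKi).1⟩
          · exact Or.inr (by rw [h', hbest])
      · intro q' hq'
        rcases List.mem_cons.mp hq' with h' | h'
        · subst h'
          exact pqLe_trans (hminb b' hb') hle_q
        · exact hmin q' h'
      · intro b0 h0
        exact pqLe_trans (hminb b' hb') (hle_best b0 h0)

lemma scanB_spec (machines counts : List Int) (hne : machines ≠ [])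
    (hlen : counts.length = machines.length) :
    ∃ K i, scanB machines counts = some (K, i) ∧
      (∃ h : i < (machines.zip counts).length,
        K = keyF ((machines.zip counts)[i]'h)) ∧
      (∀ k ∈ keysOf machines counts, pqLe K k) := by
  have hzne : machines.zip counts ≠ [] := by
    cases machines with
    | nil => exact absurd rfl hne
    | cons a l =>
        cases counts with
        | nil => simp at hlen
        | cons b m => simp
  obtain ⟨K, i, hres, hmem, hmin, _⟩ :=
    scanGo_spec ((machines.zip counts).zipIdx) none (Or.inl (by simpa using hzne))
  rcases hmem with ⟨q, hq, hi, hK⟩ | hbad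
  · rw [List.mem_zipIdx_iff_getElem?] at hq
    have hidx : (machines.zip counts)[q.2]? = some q.1 := by simpa using hq
    obtain ⟨hlt, hval⟩ := List.getElem?_eq_some_iff.mp hidx
    subst hi
    refine ⟨K, q.2, hres, ⟨hlt, by rw [hval, ← hK]⟩, ?_⟩
    intro k hk
    unfold keysOf at hk
    obtain ⟨p, hp, hpk⟩ := List.mem_map.mp hk
    obtain ⟨j, hj, hjp⟩ := List.mem_iff_getElem.mp hp
    have : (p, j) ∈ (machines.zip counts).zipIdx :=
      List.mem_zipIdx_iff_getElem?.mpr (by simpa using List.getElem?_eq_some_iff.mpr ⟨hj, hjp⟩)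
    exact hpk ▸ hmin _ this
  · simp at hbad

lemma keysOf_set (machines counts : List Int) (i : Nat) (t c : Int)
    (hi : i < machines.length) (hlen : counts.length = machines.length)
    (hm : machines[i]'hi = t) (hc : counts[i]'(by omega) = c) :
    keysOf machines (counts.set i (c + 1)) = (keysOf machines counts).set i ((c + 2) * t, t) := by
  unfold keysOf
  apply List.ext_getElem
  · simp
  · intro j h1 h2
    by_cases hij : j = i
    · subst hij
      simp only [List.getElem_map, List.getElem_zip, List.getElem_set_self]
      simp only [keyF]
      simp only [hm]
      have hcc : c + 1 + 1 = c + 2 := by ring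
      rw [hcc]
    · simp [List.getElem_map, List.getElem_zip, List.getElem_set_ne, Ne.symm hij]

lemma set_perm_cons {α : Type} (l : List α) (i : Nat) (x y : α)
    (hi : i < l.length) (hv : l[i]'hi = x) :
    l.Perm (x :: l.eraseIdx i) ∧ (l.set i y).Perm (y :: l.eraseIdx i) := by
  constructor
  · have hsplit : l = l.take i ++ x :: l.drop (i + 1) := by
      conv_lhs => rw [← List.take_append_drop i l]
      congr 1
      rw [List.drop_eq_getElem_cons hi, hv]
    rw [List.eraseIdx_eq_take_drop_succ]
    have : (l.take i ++ x :: l.drop (i + 1)).Perm (x :: (l.take i ++ l.drop (i + 1))) :=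
      List.perm_middle
    rw [← hsplit] at this
    exact this
  · have hset : l.set i y = l.take i ++ y :: l.drop (i + 1) := by
      rw [List.set_eq_take_append_cons_drop]
      simp [hi]
    rw [hset, List.eraseIdx_eq_take_drop_succ]
    exact List.perm_middle

-- the main simulation lemma: A's sorted queue stays a permutation of B's key multiset
lemma loop_eq :
    ∀ (n : Nat) (heap : List (Int × Int)) (machines counts : List Int) (temps : List Int),
      heap.Pairwise pqLe → heap.Perm (keysOf machines counts) →
      counts.length = machines.length →
      loopA n heap temps = loopB n machines counts temps := by
  intro n
  induction n with
  | zero => intro heap machines counts temps _ _ _; rfl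
  | succ n ih =>
      intro heap machines counts temps hsort hperm hlen
      rcases hmcase : machines with _ | ⟨m0, ms⟩
      · subst hmcase
        have hc0 : counts = [] := by
          cases counts with
          | nil => rfl
          | cons a l => simp at hlen
        have hh0 : heap = [] := by
          have := hperm.length_eq
          rw [hc0] at this
          simpa [keysOf] using this
        subst hc0 hh0
        simp [loopA, loopB, scanB]
      · subst hmcase
        obtain ⟨K, i, hscan, ⟨hilt, hKval⟩, hmin⟩ :=
          scanB_spec (m0 :: ms) counts (by simp) hlen
        rcases hhcase : heap with _ | ⟨H, rest⟩
        · exfalso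
          have := hperm.length_eq
          rw [hhcase] at this
          simp [keysOf, hlen] at this
        · subst hhcase
          -- H = K
          have hKeysGet : (keysOf (m0 :: ms) counts)[i]'(by simpa [keysOf] using hilt) = K := by
            unfold keysOf
            rw [List.getElem_map]
            exact hKval.symm
          have hHmem : H ∈ keysOf (m0 :: ms) counts := hperm.mem_iff.mp List.mem_cons_self
          have hKmem : K ∈ keysOf (m0 :: ms) counts := by
            rw [← hKeysGet]; exact List.getElem_mem _
          have hHmin : ∀ k ∈ keysOf (m0 :: ms) counts, pqLe H k := by
            intro k hk
            rcases List.mem_cons.mp (hperm.symm.mem_iff.mp hk) with h' | h'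
            · exact h' ▸ pqLe_refl _
            · exact (List.pairwise_cons.mp hsort).1 k h'
          have hHK : H = K := pqLe_antisymm (hHmin K hKmem) (hmin H hHmem)
          -- components of the selected machine
          have himl : i < (m0 :: ms).length := by
            have h := hilt
            rw [List.length_zip, hlen, Nat.min_self] at h
            exact h
          have hicl : i < counts.length := by
            rw [hlen]; exact himl
          set t := (m0 :: ms)[i]'himl with htdef
          set c := counts[i]'hicl with hcdef
          have hzipi : ((m0 :: ms).zip counts)[i]'hilt = (t, c) := by
            rw [List.getElem_zip]
          have hKtc : K = ((c + 1) * t, t) := by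
            rw [hKval, hzipi]; rfl
          -- the getD in loopB reads c
          have hgetD : counts.getD i 0 = c := by
            rw [List.getD_eq_getElem?_getD, List.getElem?_eq_getElem hicl]
            rfl
          -- unfold one step of both loops
          have hloopA : loopA (n + 1) (H :: rest) temps =
              loopA n (pqInsert (H.1 + H.2, H.2) rest) (temps ++ [H.1]) := by
            obtain ⟨H1, H2⟩ := H; rfl
          have hloopB : loopB (n + 1) (m0 :: ms) counts temps =
              loopB n (m0 :: ms) (counts.set i (c + 1)) (temps ++ [K.1]) := by
            simp only [loopB, hscan, hgetD]
          rw [hloopA, hloopB, hHK, hKtc]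
          -- apply IH with the new states
          have hperm' : (pqInsert (((c + 1) * t) + t, t) rest).Perm
              (keysOf (m0 :: ms) (counts.set i (c + 1))) := by
            have hkset := keysOf_set (m0 :: ms) counts i t c himl hlen rfl rfl
            have hkl : i < (keysOf (m0 :: ms) counts).length := by
              simpa [keysOf] using hilt
            obtain ⟨hpermK, hpermSet⟩ :=
              set_perm_cons (keysOf (m0 :: ms) counts) i K ((c + 2) * t, t) hkl hKeysGet
            -- rest ~ eraseIdx
            have hrest : rest.Perm ((keysOf (m0 :: ms) counts).eraseIdx i) := by
              have h1 : (K :: rest).Perm (K :: (keysOf (m0 :: ms) counts).eraseIdx i) := by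
                have h2 : (H :: rest).Perm (K :: (keysOf (m0 :: ms) counts).eraseIdx i) :=
                  hperm.trans hpermK
                rw [hHK] at h2
                exact h2
              exact h1.cons_inv
            have hval2 : (((c + 1) * t) + t, t) = ((c + 2) * t, t) := by
              have : ((c + 1) * t) + t = (c + 2) * t := by ring
              rw [this]
            have hstep1 : (pqInsert (((c + 1) * t) + t, t) rest).Perm
                ((((c + 1) * t) + t, t) :: (keysOf (m0 :: ms) counts).eraseIdx i) :=
              (pqInsert_perm _ _).trans (List.Perm.cons _ hrest)
            rw [hval2] at hstep1 ⊢
            rw [← hkset] at hpermSet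
            exact hstep1.trans hpermSet.symm
          have hsort' : (pqInsert (((c + 1) * t) + t, t) rest).Pairwise pqLe :=
            pqInsert_sorted (List.pairwise_cons.mp hsort).2
          exact ih _ _ _ _ hsort' hperm' (by simp [hlen])

-- ===== VERDICT (by name: the statement is the Claim_ definition above) =====
theorem tempsMinSansDelai_spec : Claim_equal_tempsMinSansDelai := by
  intro nbPieces machines _
  unfold Spec_tempsMinSansDelai tempsMinSansDelai tempsMinSansDelai_alt
  apply loop_eq
  · exact foldl_pqInsert_sorted machines [] (by simp)
  · have h1 := foldl_pqInsert_perm machines []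
    rw [List.append_nil] at h1
    rw [keysOf_zero machines]
    exact h1
  · simp
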